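-- pv_equiv track=rewrite | github.com/YGKim-create/Python_baseline | mecabutil.py | ExtendedPosToNormalPos
-- ===== SOURCE A (Python) =====
-- def ExtendedPosToNormalPos(posed_extended):
--     posed_normal = []
--     for idx, p in enumerate(posed_extended):
--         if len(posed_normal) > 0:
--             if posed_normal[-1][0] == '':
--                 posed_normal[-1] = (posed_normal[-1][0] + p[0], posed_normal[-1][1] + "+" + p[1])
--             else:
--                 posed_normal.append(p)
--         else:
--             posed_normal.append(p)
--     return posed_normal
-- ===== SOURCE B (Python) =====
-- def ExtendedPosToNormalPos(posed_extended):
--     result = []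
--     group = []
--     for p in posed_extended:
--         group.append(p)
--         if p[0] != '':
--             result.append(_flush(group))
--             group = []
--     if group:
--         result.append(_flush(group))
--     return result
--
--
-- def _flush(group):
--     if len(group) == 1:
--         return group[0]
--     return (''.join(e[0] for e in group), '+'.join(e[1] for e in group))
-- ===== Notes on version B (the rewrite author's own statement) =====
-- stated objective: alternative
-- what changed: B replaces A's loop that mutates the last output entry (merging while its first component is '') by a grouping pass: it collects runs that end at each element with a non-empty first component and flushes each group once with ''.join/'+'.join.
import Mathlib
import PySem

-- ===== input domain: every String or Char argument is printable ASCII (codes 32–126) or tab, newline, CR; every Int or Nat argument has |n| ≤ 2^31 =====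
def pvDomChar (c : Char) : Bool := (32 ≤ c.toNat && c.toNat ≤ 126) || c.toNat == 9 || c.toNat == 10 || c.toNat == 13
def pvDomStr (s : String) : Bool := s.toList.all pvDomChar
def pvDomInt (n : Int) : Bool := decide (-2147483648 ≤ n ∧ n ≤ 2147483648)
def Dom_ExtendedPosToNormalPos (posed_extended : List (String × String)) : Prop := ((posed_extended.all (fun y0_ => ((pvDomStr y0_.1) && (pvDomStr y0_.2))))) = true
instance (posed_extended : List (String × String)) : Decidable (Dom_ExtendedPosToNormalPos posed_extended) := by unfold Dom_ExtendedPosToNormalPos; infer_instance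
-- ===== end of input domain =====

-- B replaces A's mutate-the-last-output-entry loop by a grouping pass (close a group at each
-- element with a non-empty first component, then flush each group once); objective: alternative.

-- ===== PORT A =====
-- one step of A's loop body: append, or merge into posed_normal[-1] when its [0] is ''
def stepA (acc : List (String × String)) (p : String × String) : List (String × String) :=
  if acc.length > 0 then
    if acc.getLast!.1 = "" then
      acc.dropLast ++ [(acc.getLast!.1 ++ p.1, acc.getLast!.2 ++ "+" ++ p.2)]
    else acc ++ [p]
  else acc ++ [p]

def ExtendedPosToNormalPos (posed_extended : List (String × String)) : List (String × String) :=
  posed_extended.foldl stepA []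

-- ===== PORT B =====
-- _flush of Source B: a singleton group is kept as-is, a longer group is joined
def flushB (g : List (String × String)) : String × String :=
  match g with
  | [x] => x
  | _ => (PySem.Str.join "" (g.map (·.1)), PySem.Str.join "+" (g.map (·.2)))

-- Source B's loop: grow the current group, close it when p[0] != ''; flush the leftover group
def loopB (g : List (String × String)) : List (String × String) → List (String × String)
  | [] => if g.isEmpty then [] else [flushB g]
  | p :: rest =>
      let g' := g ++ [p]
      if p.1 ≠ "" then flushB g' :: loopB [] rest else loopB g' rest

def ExtendedPosToNormalPos_alt (posed_extended : List (String × String)) : List (String × String) :=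
  loopB [] posed_extended

-- ===== PRECONDITION & SPEC =====
def Spec_ExtendedPosToNormalPos (posed_extended : List (String × String)) (out : List (String × String)) : Prop := out = ExtendedPosToNormalPos_alt posed_extended
instance (posed_extended : List (String × String)) (out : List (String × String)) : Decidable (Spec_ExtendedPosToNormalPos posed_extended out) := by unfold Spec_ExtendedPosToNormalPos; infer_instance

-- ===== CLAIM (what is proved, stated in full; the proofs are below) =====
def Claim_equal_ExtendedPosToNormalPos : Prop := ∀ (posed_extended : List (String × String)), Dom_ExtendedPosToNormalPos posed_extended → Spec_ExtendedPosToNormalPos posed_extended (ExtendedPosToNormalPos posed_extended)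

-- ===== LEMMAS AND PROOFS =====

theorem getLast!_concat' (x : String × String) (l : List (String × String)) :
    (l ++ [x]).getLast! = x := by
  induction l with
  | nil => rfl
  | cons a l ih => simpa [List.getLast!] using ih

theorem ofList_plus_cons (cs : List Char) :
    String.ofList ('+' :: cs) = "+" ++ String.ofList cs := by
  rw [show ('+' :: cs) = ['+'] ++ cs from rfl, String.ofList_append]

theorem join_plus_concat (a x : String) (l : List String) :
    PySem.Str.join "+" ((a :: l) ++ [x]) = PySem.Str.join "+" (a :: l) ++ "+" ++ x := by
  induction l generalizing a with
  | nil =>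
      simp [PySem.Str.join, PySem.Chars.join_cons_cons, PySem.Chars.join_singleton,
        String.ofList_append, ofList_plus_cons, String.append_assoc]
  | cons b l ih =>
      have h1 : PySem.Str.join "+" ((a :: b :: l) ++ [x]) =
          a ++ "+" ++ PySem.Str.join "+" ((b :: l) ++ [x]) := by
        simp [PySem.Str.join, PySem.Chars.join_cons_cons, String.ofList_append, ofList_plus_cons,
          String.append_assoc]
      rw [h1, ih b]
      simp [PySem.Str.join, PySem.Chars.join_cons_cons, String.ofList_append, ofList_plus_cons,
        String.append_assoc]

theorem join_empty_concat (l : List String) (x : String) (h : ∀ s ∈ l, s = "") :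
    PySem.Str.join "" (l ++ [x]) = x := by
  induction l with
  | nil => simp [PySem.Str.join, PySem.Chars.join_singleton]
  | cons a l ih =>
      have ha : a = "" := h a (by simp)
      have h1 : PySem.Str.join "" ((a :: l) ++ [x]) = a ++ "" ++ PySem.Str.join "" (l ++ [x]) := by
        cases l with
        | nil => simp [PySem.Str.join, PySem.Chars.join_cons_cons, String.ofList_append,
            String.append_assoc, PySem.Chars.join_singleton]
        | cons b l' => simp [PySem.Str.join, PySem.Chars.join_cons_cons, String.ofList_append,
            String.append_assoc]
      rw [h1, ih (fun s hs => h s (by simp [hs])), ha]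
      simp

theorem join_empty_all (l : List String) (h : ∀ s ∈ l, s = "") :
    PySem.Str.join "" l = "" := by
  cases hl : l.reverse with
  | nil => simp [List.reverse_eq_nil_iff.mp hl, PySem.Str.join, PySem.Chars.join_nil]
  | cons a t =>
      have hsplit : l = t.reverse ++ [a] := by
        have := congrArg List.reverse hl; simpa using this
      subst hsplit
      rw [join_empty_concat _ _ (fun s hs => h s (by simp [hs]))]
      exact h a (by simp)

theorem join_snd_concat (a : String × String) (g : List (String × String)) (p : String × String) :
    PySem.Str.join "+" (((a :: g) ++ [p]).map (·.2)) =
      PySem.Str.join "+" ((a :: g).map (·.2)) ++ "+" ++ p.2 := by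
  have := join_plus_concat a.2 p.2 (g.map (·.2))
  simpa using this

theorem join_fst_concat (g : List (String × String)) (p : String × String)
    (h : ∀ e ∈ g, e.1 = "") :
    PySem.Str.join "" ((g ++ [p]).map (·.1)) = p.1 := by
  have := join_empty_concat (g.map (·.1)) p.1 (by
    intro s hs
    obtain ⟨e, he, rfl⟩ := List.mem_map.mp hs
    exact h e he)
  simpa using this

theorem flushB_big (a b : String × String) (g : List (String × String)) :
    flushB (a :: b :: g) =
      (PySem.Str.join "" ((a :: b :: g).map (·.1)),
       PySem.Str.join "+" ((a :: b :: g).map (·.2))) := rfl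

-- A's open-group representative: what A's last output entry looks like while the group is open
def openRep (g : List (String × String)) : List (String × String) :=
  if g.isEmpty then [] else [("", PySem.Str.join "+" (g.map (·.2)))]

theorem flushB_eq_openRep (g : List (String × String)) (hg : g ≠ [])
    (h : ∀ e ∈ g, e.1 = "") : [flushB g] = openRep g := by
  cases g with
  | nil => exact absurd rfl hg
  | cons a g' =>
      cases g' with
      | nil =>
          have ha : a.1 = "" := h a (by simp)
          have h2 : PySem.Str.join "+" [a.2] = a.2 := by
            simp [PySem.Str.join, PySem.Chars.join_singleton]
          simp [flushB, openRep, h2, ← ha]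
      | cons b g'' =>
          have hall : PySem.Str.join "" ((a :: b :: g'').map (·.1)) = "" := by
            apply join_empty_all
            intro s hs
            obtain ⟨e, he, rfl⟩ := List.mem_map.mp hs
            exact h e he
          simp only [List.map_cons] at hall
          rw [flushB_big, openRep]
          simp [hall]

-- the loop invariant: A's accumulator is the closed groups followed by the open-group representative
theorem loop_eq (rest : List (String × String)) :
    ∀ (g out : List (String × String)),
      (∀ e ∈ g, e.1 = "") →
      (out = [] ∨ out.getLast!.1 ≠ "") →
      List.foldl stepA (out ++ openRep g) rest = out ++ loopB g rest := by
  induction rest with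
  | nil =>
      intro g out hg _
      cases hgc : g with
      | nil => simp [openRep, loopB]
      | cons a g' =>
          subst hgc
          rw [List.foldl_nil, loopB]
          simp only [List.isEmpty_cons, Bool.false_eq_true, if_false]
          rw [flushB_eq_openRep _ (by simp) hg]
  | cons p rest ih =>
      intro g out hg hout
      rw [List.foldl_cons]
      cases hgc : g with
      | nil =>
          -- open group empty: A appends p
          have hacc : stepA (out ++ openRep []) p = out ++ [p] := by
            rcases hout with h | h
            · subst h; simp [stepA, openRep]
            · have hne : out ≠ [] := by
                intro hc; subst hc; exact h (by simp at h ⊢; rfl)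
              rw [show openRep [] = [] from rfl, List.append_nil]
              simp only [stepA]
              rw [if_pos (by cases out with | nil => exact absurd rfl hne | cons o t => simp),
                if_neg h]
          subst hgc
          rw [hacc, loopB]
          by_cases hp : p.1 = ""
          · -- p opens a group
            simp only [hp, ne_eq, not_true_eq_false, if_false, List.nil_append]
            have h2 : PySem.Str.join "+" [p.2] = p.2 := by
              simp [PySem.Str.join, PySem.Chars.join_singleton]
            have hrep : out ++ [p] = out ++ openRep [p] := by
              simp [openRep, h2, ← hp]
            rw [hrep, ih [p] out (by simpa using hp) hout]
          · -- p is its own closed group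
            simp only [ne_eq, hp, not_false_eq_true, if_true]
            have hfl : flushB [p] = p := rfl
            have hstep := ih [] (out ++ [p]) (by simp)
              (Or.inr (by rw [getLast!_concat']; exact hp))
            rw [show openRep [] = [] from rfl, List.append_nil] at hstep
            simp only [List.nil_append]
            rw [hstep, hfl, List.append_assoc, List.singleton_append]
      | cons a g' =>
          subst hgc
          -- open group nonempty: A merges p into its last entry
          have hacc : stepA (out ++ openRep (a :: g')) p =
              out ++ [(p.1, PySem.Str.join "+" ((a :: g').map (·.2)) ++ "+" ++ p.2)] := by
            rw [show openRep (a :: g')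
                = [("", PySem.Str.join "+" ((a :: g').map (·.2)))] from rfl]
            simp only [stepA]
            rw [if_pos (by simp), getLast!_concat']
            simp
          rw [hacc, loopB]
          by_cases hp : p.1 = ""
          · -- p extends the open group
            simp only [hp, ne_eq, not_true_eq_false, if_false]
            have hrep : out ++ [("", PySem.Str.join "+" ((a :: g').map (·.2)) ++ "+" ++ p.2)]
                = out ++ openRep ((a :: g') ++ [p]) := by
              rw [show openRep ((a :: g') ++ [p])
                  = [("", PySem.Str.join "+" (((a :: g') ++ [p]).map (·.2)))] from rfl,
                join_snd_concat]
            rw [hrep, ih _ out (by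
              intro e he
              rcases List.mem_append.mp he with h | h
              · exact hg e h
              · simp at h; simp [h, hp]) hout]
          · -- p closes the group
            simp only [ne_eq, hp, not_false_eq_true, if_true]
            have hfl : flushB ((a :: g') ++ [p]) =
                (p.1, PySem.Str.join "+" ((a :: g').map (·.2)) ++ "+" ++ p.2) := by
              cases g' with
              | nil =>
                  have h1 := join_fst_concat [a] p hg
                  have h2 := join_snd_concat a [] p
                  simp only [List.cons_append, List.nil_append, List.map_cons, List.map_nil,
                    List.map_append] at h1 h2 ⊢
                  rw [flushB_big, Prod.mk.injEq]
                  exact ⟨h1, h2⟩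
              | cons b g'' =>
                  have h1 := join_fst_concat (a :: b :: g'') p hg
                  have h2 := join_snd_concat a (b :: g'') p
                  simp only [List.cons_append, List.nil_append, List.map_cons, List.map_nil,
                    List.map_append] at h1 h2 ⊢
                  rw [flushB_big, Prod.mk.injEq]
                  simp only [List.map_cons, List.map_append, List.map_nil]
                  exact ⟨h1, h2⟩
            have hstep := ih [] (out ++ [flushB ((a :: g') ++ [p])]) (by simp)
              (Or.inr (by rw [getLast!_concat', hfl]; exact hp))
            rw [show openRep [] = [] from rfl, List.append_nil, hfl] at hstep
            rw [hstep, List.append_assoc, List.singleton_append, hfl]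

-- ===== VERDICT (by name: the statement is the Claim_ definition above) =====
theorem ExtendedPosToNormalPos_spec : Claim_equal_ExtendedPosToNormalPos := by
  intro l _
  unfold Spec_ExtendedPosToNormalPos ExtendedPosToNormalPos ExtendedPosToNormalPos_alt
  have h := loop_eq l [] [] (by simp) (Or.inl rfl)
  simpa [openRep] using h
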